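-- pv_equiv track=rewrite | github.com/lhx499598826/openclaw_external_skills_library | categories/UniversalSkills/skill-security-review/scripts/evidence_parser.py | _split_urls
-- ===== SOURCE A (Python) =====
-- from typing import Dict, List
--
-- TRUSTED_REVIEW_HOSTS = {
--     "github.com",
--     "raw.githubusercontent.com",
--     "codeload.github.com",
--     "api.github.com",
--     "registry.npmjs.org",
--     "npmjs.com",
-- }
--
-- def _split_urls(urls: List[str]) -> tuple[List[str], List[str]]:
--     trusted: List[str] = []
--     untrusted: List[str] = []
--     for url in sorted(set(urls)):
--         if "{" in url or "(" in url or "[" in url or "\\" in url: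
--             continue
--         host = url.split("//", 1)[-1].split("/", 1)[0].lower()
--         if host in TRUSTED_REVIEW_HOSTS:
--             trusted.append(url)
--         else:
--             untrusted.append(url)
--     return trusted, untrusted
-- ===== SOURCE B (Python) =====
-- TRUSTED_REVIEW_HOSTS = {
--     "github.com",
--     "raw.githubusercontent.com",
--     "codeload.github.com",
--     "api.github.com",
--     "registry.npmjs.org",
--     "npmjs.com",
-- }
--
-- def _split_urls(urls):
--     # One global sort on a compound (untrusted?, url) key groups the whole
--     # answer: trusted urls come first, each group already sorted; then the
--     # list is cut at the boundary index instead of routing urls one by one.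
--     keyed = sorted(
--         (url.split("//", 1)[-1].split("/", 1)[0].lower() not in TRUSTED_REVIEW_HOSTS, url)
--         for url in set(urls)
--         if not ("{" in url or "(" in url or "[" in url or "\\" in url)
--     )
--     k = sum(1 for flag, _ in keyed if not flag)
--     return [url for _, url in keyed[:k]], [url for _, url in keyed[k:]]
-- ===== Notes on version B (the rewrite author's own statement) =====
-- stated objective: alternative
-- what changed: B never routes urls into two lists: it tags each kept distinct url with a compound (untrusted?, url) sort key, does ONE global sort that groups trusted urls first (each group internally sorted), and cuts the sorted list at the boundary index, whereas A iterates the sorted dedup and appends each url to one of two accumulators.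
import Mathlib
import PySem

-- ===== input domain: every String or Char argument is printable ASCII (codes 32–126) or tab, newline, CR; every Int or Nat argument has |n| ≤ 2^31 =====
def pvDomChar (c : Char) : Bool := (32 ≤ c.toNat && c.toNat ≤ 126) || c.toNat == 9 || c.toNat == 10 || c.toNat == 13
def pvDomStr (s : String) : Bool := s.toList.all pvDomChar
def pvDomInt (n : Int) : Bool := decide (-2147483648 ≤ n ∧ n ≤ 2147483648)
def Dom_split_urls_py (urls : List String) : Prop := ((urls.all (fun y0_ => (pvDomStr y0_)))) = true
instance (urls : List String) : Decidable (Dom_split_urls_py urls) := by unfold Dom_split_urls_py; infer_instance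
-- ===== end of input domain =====

-- B classifies by a compound (untrusted?, url) sort key and cuts the single sorted list at the
-- boundary index, instead of routing each url into one of two lists ("alternative").

-- ===== PORT A =====
def pvTrustedHosts : List String :=
  ["github.com", "raw.githubusercontent.com", "codeload.github.com",
   "api.github.com", "registry.npmjs.org", "npmjs.com"]

-- '"{" in url or "(" in url or "[" in url or "\\" in url'
def pvSkip (url : String) : Bool :=
  PySem.Str.isIn "{" url || PySem.Str.isIn "(" url || PySem.Str.isIn "[" url || PySem.Str.isIn "\\" url

-- url.split("//", 1)[-1].split("/", 1)[0].lower()  (split with a nonempty sep never fails and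
-- never yields an empty list, so the .getD defaults are never consulted)
def pvHost (url : String) : String :=
  PySem.Str.lower
    (PySem.List.pyGetD
      ((PySem.Str.splitMax? (PySem.List.pyGetD ((PySem.Str.splitMax? url "//" 1).getD []) (-1) "") "/" 1).getD [])
      0 "")

def split_urls_py (urls : List String) : List String × List String :=
  (PySem.List.sorted (PySem.Set.ofList urls) (fun x => x) false).foldl
    (fun (acc : List String × List String) url =>
      if pvSkip url then acc
      else if pvTrustedHosts.contains (pvHost url) then (acc.1 ++ [url], acc.2)
      else (acc.1, acc.2 ++ [url]))
    ([], [])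

-- ===== PORT B =====
-- keyed = sorted((host(url) not in TRUSTED, url) for url in set(urls) if not skip(url))
-- (Python sorts the (bool, str) tuples lexicographically: sorted2 with fst/snd keys)
def split_urls_py_alt (urls : List String) : List String × List String :=
  let keyed : List (Bool × String) :=
    PySem.List.sorted2
      (((PySem.Set.ofList urls).filter (fun url => !pvSkip url)).map
        (fun url => (!pvTrustedHosts.contains (pvHost url), url)))
      (fun p => p.1) (fun p => p.2) false
  -- k = sum(1 for flag, _ in keyed if not flag)
  let k : Int := keyed.foldl (fun acc p => if !p.1 then acc + 1 else acc) 0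
  ((PySem.List.slice keyed none (some k)).map (fun p => p.2),
   (PySem.List.slice keyed (some k) none).map (fun p => p.2))

-- ===== PRECONDITION & SPEC =====
def Spec_split_urls_py (urls : List String) (out : List String × List String) : Prop := out = split_urls_py_alt urls
instance (urls : List String) (out : List String × List String) : Decidable (Spec_split_urls_py urls out) := by unfold Spec_split_urls_py; infer_instance

-- ===== CLAIM (what is proved, stated in full; the proofs are below) =====
def Claim_equal_split_urls_py : Prop := ∀ (urls : List String), Dom_split_urls_py urls → Spec_split_urls_py urls (split_urls_py urls)

-- ===== LEMMAS AND PROOFS =====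

-- the trusted / untrusted selection predicates
def pvT (url : String) : Bool := !pvSkip url && pvTrustedHosts.contains (pvHost url)
def pvU (url : String) : Bool := !pvSkip url && !(pvTrustedHosts.contains (pvHost url))

-- A's partitioning fold computes the two filters
theorem pv_fold_eq (L : List String) (a b : List String) :
    L.foldl
      (fun (acc : List String × List String) url =>
        if pvSkip url then acc
        else if pvTrustedHosts.contains (pvHost url) then (acc.1 ++ [url], acc.2)
        else (acc.1, acc.2 ++ [url]))
      (a, b) = (a ++ L.filter pvT, b ++ L.filter pvU) := by
  induction L generalizing a b with
  | nil => simp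
  | cons x xs ih =>
    rw [List.foldl_cons]
    by_cases hs : pvSkip x = true
    · rw [if_pos hs, ih]
      simp [pvT, pvU, hs]
    · by_cases ht : pvTrustedHosts.contains (pvHost x) = true
      · rw [if_neg hs, if_pos ht, ih]
        simp [pvT, pvU, hs, List.filter_cons, List.append_assoc]
        simpa using ht
      · rw [if_neg hs, if_neg ht, ih]
        simp [pvT, pvU, hs, List.filter_cons, List.append_assoc]
        simpa using ht

-- Python's lexicographic tuple sort is a sort by the lexicographic product key
theorem pv_sorted2_eq_sorted_lex {α κ₁ κ₂ : Type} [LinearOrder κ₁] [LinearOrder κ₂]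
    (xs : List α) (k1 : α → κ₁) (k2 : α → κ₂) :
    PySem.List.sorted2 xs k1 k2 false
      = PySem.List.sorted xs (fun a => toLex (k1 a, k2 a)) false := by
  have h : (fun a b => decide (k1 a < k1 b) || (!decide (k1 b < k1 a) && decide (k2 a < k2 b)))
      = (fun a b : α => decide ((toLex (k1 a, k2 a) : Lex (κ₁ × κ₂)) < toLex (k1 b, k2 b))) := by
    funext a b
    rcases lt_trichotomy (k1 a) (k1 b) with h1 | h1 | h1
    · simp [h1, Prod.Lex.lt_iff]
    · simp [h1, Prod.Lex.lt_iff]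
    · simp [h1, not_lt_of_gt h1, Prod.Lex.lt_iff, ne_of_gt h1]
  simp only [PySem.List.sorted2, PySem.List.sorted, if_neg (by decide : ¬ (false = true))]
  rw [h]

set_option maxHeartbeats 1000000 in
-- the sorted keyed pair list is exactly: trusted urls tagged false, then untrusted urls tagged true
-- (stated for any L that enumerates the distinct urls in increasing order)
theorem pv_keyed_gen (S L : List String) (hperm : L.Perm S)
    (hLp : List.Pairwise (fun a b => a < b) L) :
    PySem.List.sorted2
      ((S.filter (fun url => !pvSkip url)).map
        (fun url => (!pvTrustedHosts.contains (pvHost url), url)))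
      (fun p => p.1) (fun p => p.2) false
    = (L.filter pvT).map (fun u => ((false : Bool), u))
      ++ (L.filter pvU).map (fun u => ((true : Bool), u)) := by
  rw [pv_sorted2_eq_sorted_lex]
  apply PySem.List.sorted_eq_of_perm_of_pairwise_lt
  · -- permutation
    have hT : (L.filter pvT).map (fun u => ((false : Bool), u))
        = (L.filter pvT).map (fun url => (!pvTrustedHosts.contains (pvHost url), url)) := by
      apply List.map_congr_left
      intro u hu
      have := List.of_mem_filter hu
      simp only [pvT, Bool.and_eq_true] at this
      simp only [this.2, Bool.not_true]
    have hU : (L.filter pvU).map (fun u => ((true : Bool), u))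
        = (L.filter pvU).map (fun url => (!pvTrustedHosts.contains (pvHost url), url)) := by
      apply List.map_congr_left
      intro u hu
      have := List.of_mem_filter hu
      simp only [pvU, Bool.and_eq_true, Bool.not_eq_eq_eq_not, Bool.not_true] at this
      simp only [this.2, Bool.not_false]
    rw [hT, hU, ← List.map_append]
    apply List.Perm.map
    have e1 : L.filter pvT
        = (L.filter (fun url => !pvSkip url)).filter (fun url => pvTrustedHosts.contains (pvHost url)) := by
      rw [List.filter_filter]
      exact List.filter_congr (fun u _ => by simp [pvT, Bool.and_comm])
    have e2 : L.filter pvU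
        = (L.filter (fun url => !pvSkip url)).filter (fun url => !pvTrustedHosts.contains (pvHost url)) := by
      rw [List.filter_filter]
      exact List.filter_congr (fun u _ => by simp [pvU, Bool.and_comm])
    rw [e1, e2]
    exact (List.filter_append_perm _ _).trans (hperm.filter _)
  · -- pairwise strictly increasing lexicographic keys
    rw [List.pairwise_append]
    refine ⟨?_, ?_, ?_⟩
    · rw [List.pairwise_map]
      exact (hLp.filter pvT).imp (fun h => by simp [Prod.Lex.lt_iff, h])
    · rw [List.pairwise_map]
      exact (hLp.filter pvU).imp (fun h => by simp [Prod.Lex.lt_iff, h])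
    · intro a ha b hb
      simp only [List.mem_map] at ha hb
      obtain ⟨u, -, rfl⟩ := ha
      obtain ⟨v, -, rfl⟩ := hb
      simp [Prod.Lex.lt_iff]

theorem pv_keyed (urls : List String) :
    PySem.List.sorted2
      (((PySem.Set.ofList urls).filter (fun url => !pvSkip url)).map
        (fun url => (!pvTrustedHosts.contains (pvHost url), url)))
      (fun p => p.1) (fun p => p.2) false
    = ((PySem.List.sorted (PySem.Set.ofList urls) (fun x => x) false).filter pvT).map (fun u => ((false : Bool), u))
      ++ ((PySem.List.sorted (PySem.Set.ofList urls) (fun x => x) false).filter pvU).map (fun u => ((true : Bool), u)) :=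
  pv_keyed_gen (PySem.Set.ofList urls) _
    (PySem.List.sorted_perm (PySem.Set.ofList urls) (fun x => x) false)
    (PySem.List.sorted_ofList_pairwise_lt urls)

-- ===== VERDICT (by name: the statement is the Claim_ definition above) =====
set_option maxHeartbeats 1000000 in
theorem split_urls_py_spec : Claim_equal_split_urls_py := by
  intro urls _
  unfold Spec_split_urls_py split_urls_py split_urls_py_alt
  rw [pv_fold_eq]
  simp only [pv_keyed, List.nil_append]
  rw [PySem.List.foldl_if_add_one (p := fun p : Bool × String => !p.1)]
  have hcount : (0 : Int) + (((((PySem.List.sorted (PySem.Set.ofList urls) (fun x => x) false).filter pvT).map (fun u => ((false : Bool), u))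
      ++ ((PySem.List.sorted (PySem.Set.ofList urls) (fun x => x) false).filter pvU).map (fun u => ((true : Bool), u))).countP (fun p => !p.1) : Nat) : Int)
      = (((PySem.List.sorted (PySem.Set.ofList urls) (fun x => x) false).filter pvT).length : Int) := by
    simp [List.countP_append, List.countP_map, Function.comp_def, List.countP_true, List.countP_false]
  rw [hcount]
  rw [PySem.List.slice_to _ (by positivity), PySem.List.slice_from _ (by positivity)]
  have hlen : (((PySem.List.sorted (PySem.Set.ofList urls) (fun x => x) false).filter pvT).length : Int).toNat
      = (((PySem.List.sorted (PySem.Set.ofList urls) (fun x => x) false).filter pvT).map (fun u => ((false : Bool), u))).length := by simp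
  rw [hlen, List.take_left, List.drop_left]
  simp
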